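-- pv_equiv track=rewrite | github.com/comet65535/Sentinel-CR | ai-engine-python/agents/fixer_agent.py | _is_candidate_compatible
-- ===== SOURCE A (Python) =====
-- def _is_candidate_compatible(diff_text: str, code_text: str) -> bool:
--     if not code_text:
--         return False
--     source_lines = code_text.splitlines()
--     source_set = set(source_lines)
--     for line in diff_text.splitlines():
--         if line.startswith("-") and not line.startswith("---"):
--             removed = line[1:]
--             if removed not in source_set:
--                 return False
--     return True
-- ===== SOURCE B (Python) =====
-- def _is_candidate_compatible(diff_text: str, code_text: str) -> bool:
--     if not code_text:
--         return False
--     removed = sorted(line[1:] for line in diff_text.splitlines()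
--                      if line.startswith("-") and not line.startswith("---"))
--     source = sorted(code_text.splitlines())
--     i = j = 0
--     while i < len(removed):
--         if j == len(source):
--             return False
--         if source[j] < removed[i]:
--             j += 1
--         elif source[j] == removed[i]:
--             i += 1
--         else:
--             return False
--     return True
-- ===== Notes on version B (the rewrite author's own statement) =====
-- stated objective: alternative
-- what changed: Replaced A's hash-set build plus per-line early-exit membership loop by sorting both the removed lines and the source lines and deciding containment with a single two-pointer merge scan.
import Mathlib
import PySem

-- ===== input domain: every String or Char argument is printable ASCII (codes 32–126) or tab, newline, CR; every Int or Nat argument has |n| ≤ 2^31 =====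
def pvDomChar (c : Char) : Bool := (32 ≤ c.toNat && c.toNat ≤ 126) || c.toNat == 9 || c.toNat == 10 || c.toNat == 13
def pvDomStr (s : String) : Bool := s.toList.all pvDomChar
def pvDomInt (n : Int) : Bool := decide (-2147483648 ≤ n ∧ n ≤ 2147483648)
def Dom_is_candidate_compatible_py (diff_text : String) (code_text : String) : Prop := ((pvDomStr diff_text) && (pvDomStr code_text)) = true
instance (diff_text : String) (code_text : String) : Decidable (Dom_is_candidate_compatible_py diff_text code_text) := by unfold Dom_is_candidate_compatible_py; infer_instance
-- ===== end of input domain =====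

-- B replaces A's hash-set membership loop by sorting both the removed lines and the
-- source lines and checking containment with a single two-pointer merge scan
-- (objective: alternative — sort-then-merge instead of hash lookup).

-- ===== PORT A =====
-- the 'for line in diff_text.splitlines(): … return False' loop, with early exit
def pvLoopA (source_set : PySem.Set String) : List String → Bool
  | [] => true
  | line :: rest =>
    if PySem.Str.startswith line "-" && !(PySem.Str.startswith line "---") then
      let removed := PySem.Str.slice line (some 1) none
      if !(PySem.Set.contains source_set removed) then false
      else pvLoopA source_set rest
    else pvLoopA source_set rest

def is_candidate_compatible_py (diff_text : String) (code_text : String) : Bool :=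
  if code_text == "" then false
  else
    let source_lines := PySem.Str.splitlines code_text
    let source_set := PySem.Set.ofList source_lines
    pvLoopA source_set (PySem.Str.splitlines diff_text)

-- ===== PORT B =====
-- Source B's two-pointer while loop over the two sorted lists, as recursion on the
-- suffixes removed[i:], source[j:]
def pvMergeB : List String → List String → Bool
  | [], _ => true
  | _ :: _, [] => false
  | r :: rs, s :: ss =>
      if s < r then pvMergeB (r :: rs) ss
      else if s == r then pvMergeB rs (s :: ss)
      else false
termination_by r s => r.length + s.length

def is_candidate_compatible_py_alt (diff_text : String) (code_text : String) : Bool :=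
  if code_text == "" then false
  else
    let removed := PySem.List.sorted
      (((PySem.Str.splitlines diff_text).filter
          (fun line => PySem.Str.startswith line "-" && !(PySem.Str.startswith line "---"))).map
        (fun line => PySem.Str.slice line (some 1) none)) (fun x => x) false
    let source := PySem.List.sorted (PySem.Str.splitlines code_text) (fun x => x) false
    pvMergeB removed source

-- ===== PRECONDITION & SPEC =====
def Spec_is_candidate_compatible_py (diff_text : String) (code_text : String) (out : Bool) : Prop := out = is_candidate_compatible_py_alt diff_text code_text
instance (diff_text : String) (code_text : String) (out : Bool) : Decidable (Spec_is_candidate_compatible_py diff_text code_text out) := by unfold Spec_is_candidate_compatible_py; infer_instance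

-- ===== CLAIM (what is proved, stated in full; the proofs are below) =====
def Claim_equal_is_candidate_compatible_py : Prop := ∀ (diff_text : String) (code_text : String), Dom_is_candidate_compatible_py diff_text code_text → Spec_is_candidate_compatible_py diff_text code_text (is_candidate_compatible_py diff_text code_text)

-- ===== LEMMAS AND PROOFS =====
-- A's early-exit loop is true iff every filtered-and-sliced line is in the set
theorem pvLoopA_eq_all (ss : PySem.Set String) (ls : List String) :
    pvLoopA ss ls = ls.all (fun line =>
      !(PySem.Str.startswith line "-" && !(PySem.Str.startswith line "---"))
      || PySem.Set.contains ss (PySem.Str.slice line (some 1) none)) := by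
  induction ls with
  | nil => rfl
  | cons line rest ih =>
    rw [List.all_cons, ← ih]
    show (if PySem.Str.startswith line "-" && !(PySem.Str.startswith line "---") then
        if !(PySem.Set.contains ss (PySem.Str.slice line (some 1) none)) then false
        else pvLoopA ss rest
      else pvLoopA ss rest) = _
    cases hP : (PySem.Str.startswith line "-" && !(PySem.Str.startswith line "---")) with
    | false => simp only [if_neg Bool.false_ne_true, Bool.not_false, Bool.true_or,
        Bool.true_and]
    | true =>
      rw [if_pos rfl]
      cases hC : PySem.Set.contains ss (PySem.Str.slice line (some 1) none) with
      | false => simp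
      | true => simp

-- the two-pointer merge scan on sorted lists decides list containment
theorem pvMergeB_correct (r s : List String)
    (hr : r.Pairwise (· ≤ ·)) (hs : s.Pairwise (· ≤ ·)) :
    pvMergeB r s = true ↔ ∀ x ∈ r, x ∈ s := by
  fun_induction pvMergeB r s with
  | case1 s => simp
  | case2 r rs =>
    simp only [Bool.false_eq_true, false_iff, not_forall]
    exact ⟨r, List.mem_cons_self, List.not_mem_nil⟩
  | case3 r rs s ss hlt ih =>
    rw [ih hr (List.Pairwise.sublist (List.sublist_cons_self s ss) hs)]
    constructor
    · intro h x hx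
      exact List.mem_cons_of_mem s (h x hx)
    · intro h x hx
      have hrx : r ≤ x := by
        rcases List.mem_cons.mp hx with rfl | hx'
        · exact le_refl x
        · exact (List.pairwise_cons.mp hr).1 x hx'
      have : x ≠ s := fun he => absurd (he ▸ hrx) (not_le.mpr hlt)
      rcases List.mem_cons.mp (h x hx) with he | hm
      · exact absurd he this
      · exact hm
  | case4 r rs s ss hlt heq ih =>
    have hes : s = r := by simpa using heq
    rw [ih (List.Pairwise.sublist (List.sublist_cons_self r rs) hr) hs]
    constructor
    · intro h x hx
      rcases List.mem_cons.mp hx with rfl | hx'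
      · exact hes ▸ List.mem_cons_self
      · exact h x hx'
    · intro h x hx
      exact h x (List.mem_cons_of_mem r hx)
  | case5 r rs s ss hlt heq =>
    simp only [Bool.false_eq_true, false_iff]
    intro h
    have hmem := h r List.mem_cons_self
    have hrs : r < s := lt_of_not_ge (fun hge => hlt (lt_of_le_of_ne hge (by simpa using heq)))
    rcases List.mem_cons.mp hmem with he | hm
    · exact absurd he (ne_of_lt hrs)
    · have := (List.pairwise_cons.mp hs).1 r hm
      exact absurd this (not_le.mpr hrs)

-- ===== VERDICT (by name: the statement is the Claim_ definition above) =====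
theorem is_candidate_compatible_py_spec : Claim_equal_is_candidate_compatible_py := by
  intro d c _
  unfold Spec_is_candidate_compatible_py is_candidate_compatible_py is_candidate_compatible_py_alt
  by_cases hc : (c == "") = true
  · rw [if_pos hc, if_pos hc]
  · rw [if_neg hc, if_neg hc, pvLoopA_eq_all, Bool.eq_iff_iff, List.all_eq_true,
      pvMergeB_correct _ _ (PySem.List.sorted_pairwise _ _) (PySem.List.sorted_pairwise _ _)]
    simp only [PySem.List.mem_sorted, List.mem_map, List.mem_filter]
    constructor
    · rintro h x ⟨line, ⟨hmem, hf⟩, rfl⟩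
      have h2 := h line hmem
      rw [hf] at h2
      simpa [PySem.Set.contains_iff, PySem.Set.mem_ofList] using h2
    · intro h line hmem
      cases hf : (PySem.Str.startswith line "-" && !(PySem.Str.startswith line "---")) with
      | false => simp
      | true =>
        simp only [Bool.not_true, Bool.false_or, PySem.Set.contains_iff, PySem.Set.mem_ofList]
        exact h _ ⟨line, ⟨hmem, hf⟩, rfl⟩
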